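-- pv_equiv track=rewrite | github.com/ts207/solo | project/research/condition_key_contract.py | normalize_condition_keys
-- ===== SOURCE A (Python) =====
-- from collections.abc import Iterable
--
-- CONDITION_KEY_ALIASES = {
--     "funding_bps": "funding_rate_bps",
-- }
--
-- def _norm(value: object) -> str:
--     return str(value or "").strip()
--
-- def normalize_condition_keys(keys: Iterable[str]) -> set[str]:
--     out: set[str] = set()
--     for key in keys:
--         token = _norm(key)
--         if not token:
--             continue
--         out.add(token)
--         out.add(token.lower())
--         alias = CONDITION_KEY_ALIASES.get(token)
--         if alias:
--             out.add(alias)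
--             out.add(alias.lower())
--         for alias_key, canonical in CONDITION_KEY_ALIASES.items():
--             if token == canonical:
--                 out.add(alias_key)
--                 out.add(alias_key.lower())
--     return out
-- ===== SOURCE B (Python) =====
-- CONDITION_KEY_ALIASES = {
--     "funding_bps": "funding_rate_bps",
-- }
--
-- # Companion table built once: each alias key and each canonical value maps to the
-- # strings the original's forward/reverse alias branches would add.
-- RELATED: dict[str, list[str]] = {}
-- for _alias, _canon in CONDITION_KEY_ALIASES.items():
--     RELATED.setdefault(_alias, []).extend([_canon, _canon.lower()])
--     RELATED.setdefault(_canon, []).extend([_alias, _alias.lower()])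
--
--
-- def normalize_condition_keys(keys):
--     out: set[str] = set()
--     for key in keys:
--         token = str(key or "").strip()
--         if token:
--             out.add(token)
--             out.add(token.lower())
--             out.update(RELATED.get(token, ()))
--     return out
-- ===== Notes on version B (the rewrite author's own statement) =====
-- stated objective: simpler
-- what changed: Replaced the per-key forward .get branch plus the reverse scan over CONDITION_KEY_ALIASES.items() by a companion table RELATED precomputed once from the alias dict, so the loop body is a single flat lookup/update with no inner scan or conditionals.
import Mathlib
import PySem

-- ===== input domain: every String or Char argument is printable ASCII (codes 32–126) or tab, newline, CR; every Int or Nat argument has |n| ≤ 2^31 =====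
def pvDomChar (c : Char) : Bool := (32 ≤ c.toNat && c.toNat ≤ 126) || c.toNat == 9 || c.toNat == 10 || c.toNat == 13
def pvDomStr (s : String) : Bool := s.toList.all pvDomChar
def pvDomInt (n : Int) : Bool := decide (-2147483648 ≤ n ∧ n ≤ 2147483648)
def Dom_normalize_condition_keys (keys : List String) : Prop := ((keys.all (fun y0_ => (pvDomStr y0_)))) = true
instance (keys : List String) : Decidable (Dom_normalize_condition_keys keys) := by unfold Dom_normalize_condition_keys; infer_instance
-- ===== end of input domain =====

-- B precomputes a companion table from the alias dict once, replacing A's per-key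
-- forward .get branch and reverse items() scan by one flat table lookup (objective: simpler).

-- ===== PORT A =====
def pvAliasesA : PySem.Dict String String := PySem.Dict.ofList [("funding_bps", "funding_rate_bps")]

-- _norm(value) = str(value or "").strip(); on a str argument 'value or ""' is value unless empty
def pvNorm (value : String) : String := PySem.Str.strip (if value == "" then "" else value)

def normalize_condition_keys (keys : List String) : List String :=
  keys.foldl (fun out key =>
    let token := pvNorm key
    if token == "" then out
    else
      let out1 := PySem.Set.add out token
      let out2 := PySem.Set.add out1 (PySem.Str.lower token)
      let out3 :=
        match pvAliasesA.get? token with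
        | some als =>
            if als == "" then out2
            else PySem.Set.add (PySem.Set.add out2 als) (PySem.Str.lower als)
        | none => out2
      pvAliasesA.items.foldl (fun o p =>
        if token == p.2 then
          PySem.Set.add (PySem.Set.add o p.1) (PySem.Str.lower p.1)
        else o) out3) PySem.Set.empty

-- ===== PORT B =====
def pvAliasesB : PySem.Dict String String := PySem.Dict.ofList [("funding_bps", "funding_rate_bps")]

-- RELATED, built once from CONDITION_KEY_ALIASES exactly as Source B does
def pvRelated : PySem.Dict String (List String) :=
  pvAliasesB.items.foldl (fun d p =>
    let d1 := d.insert p.1 (d.getD p.1 [] ++ [p.2, PySem.Str.lower p.2])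
    d1.insert p.2 (d1.getD p.2 [] ++ [p.1, PySem.Str.lower p.1])) PySem.Dict.empty

def normalize_condition_keys_alt (keys : List String) : List String :=
  keys.foldl (fun out key =>
    let token := PySem.Str.strip (if key == "" then "" else key)
    if token == "" then out
    else
      PySem.Set.update
        (PySem.Set.add (PySem.Set.add out token) (PySem.Str.lower token))
        (pvRelated.getD token [])) PySem.Set.empty

-- ===== PRECONDITION & SPEC =====
def Spec_normalize_condition_keys (keys : List String) (out : List String) : Prop := out = normalize_condition_keys_alt keys
instance (keys : List String) (out : List String) : Decidable (Spec_normalize_condition_keys keys out) := by unfold Spec_normalize_condition_keys; infer_instance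

-- ===== CLAIM (what is proved, stated in full; the proofs are below) =====
def Claim_equal_normalize_condition_keys : Prop := ∀ (keys : List String), Dom_normalize_condition_keys keys → Spec_normalize_condition_keys keys (normalize_condition_keys keys)

-- ===== LEMMAS AND PROOFS =====

-- pvRelated evaluated once (it is a closed term)
theorem pv_related_eval : pvRelated = PySem.Dict.ofList
    [("funding_bps", ["funding_rate_bps", "funding_rate_bps"]),
     ("funding_rate_bps", ["funding_bps", "funding_bps"])] := by decide

-- The two loop bodies agree for every accumulator and every normalized token.
theorem pv_body_eq (out : List String) (token : String) :
    (if token == "" then out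
     else
       let out1 := PySem.Set.add out token
       let out2 := PySem.Set.add out1 (PySem.Str.lower token)
       let out3 :=
         match pvAliasesA.get? token with
         | some als =>
             if als == "" then out2
             else PySem.Set.add (PySem.Set.add out2 als) (PySem.Str.lower als)
         | none => out2
       pvAliasesA.items.foldl (fun o p =>
         if token == p.2 then
           PySem.Set.add (PySem.Set.add o p.1) (PySem.Str.lower p.1)
         else o) out3)
    = (if token == "" then out
       else
         PySem.Set.update
           (PySem.Set.add (PySem.Set.add out token) (PySem.Str.lower token))
           (pvRelated.getD token [])) := by
  rw [pv_related_eval]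
  by_cases h1 : token = "funding_bps"
  · subst h1; rfl
  · by_cases h2 : token = "funding_rate_bps"
    · subst h2; rfl
    · by_cases h0 : token = ""
      · simp [h0]
      · have e1 : ("funding_bps" == token) = false := by
          simpa using Ne.symm h1
        have e2 : ("funding_rate_bps" == token) = false := by
          simpa using Ne.symm h2
        have hA : pvAliasesA = PySem.Dict.mk [("funding_bps", "funding_rate_bps")] := by decide
        have hR : (PySem.Dict.ofList
            [("funding_bps", ["funding_rate_bps", "funding_rate_bps"]),
             ("funding_rate_bps", ["funding_bps", "funding_bps"])] : PySem.Dict String (List String))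
            = PySem.Dict.mk
            [("funding_bps", ["funding_rate_bps", "funding_rate_bps"]),
             ("funding_rate_bps", ["funding_bps", "funding_bps"])] := by decide
        simp [h0, h2, hA, hR, PySem.Dict.getD_eq_get?_getD,
          PySem.Set.update, e1, e2, PySem.Dict.get?]

-- ===== VERDICT (by name: the statement is the Claim_ definition above) =====
theorem normalize_condition_keys_spec : Claim_equal_normalize_condition_keys := by
  intro keys _
  show normalize_condition_keys keys = normalize_condition_keys_alt keys
  unfold normalize_condition_keys normalize_condition_keys_alt
  apply List.foldl_ext
  intro out key _
  exact pv_body_eq out (PySem.Str.strip (if key == "" then "" else key))
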